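-- pv_equiv track=rewrite | github.com/KmXK/dvoretskii_bot | steward/helpers/bills_money.py | net_debts
-- ===== SOURCE A (Python) =====
-- def net_debts(debts: dict[str, dict[str, int]]) -> dict[str, dict[str, int]]:
--     """Collapse mutual debts A↔B, keep only the net positive direction."""
--     from collections import defaultdict
--
--     result: dict[str, dict[str, int]] = defaultdict(lambda: defaultdict(int))
--     seen: set[tuple[str, str]] = set()
--     for debtor, creds in debts.items():
--         for creditor, amount in creds.items():
--             if (creditor, debtor) in seen:
--                 continue
--             seen.add((debtor, creditor))
--             reverse = debts.get(creditor, {}).get(debtor, 0)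
--             net = amount - reverse
--             if net > 0:
--                 result[debtor][creditor] = net
--             elif net < 0:
--                 result[creditor][debtor] = -net
--     return result
-- ===== SOURCE B (Python) =====
-- def net_debts(debts: dict[str, dict[str, int]]) -> dict[str, dict[str, int]]:
--     """Collapse mutual debts A<->B, keep only the net positive direction."""
--     from collections import defaultdict
--
--     # pass 1: signed per-unordered-pair accumulator, keyed in first-occurrence order
--     net_by_pair: dict[tuple[str, str], int] = {}
--     for debtor, creds in debts.items():
--         for creditor, amount in creds.items():
--             if debtor == creditor:
--                 continue
--             if debtor < creditor:
--                 key, delta = (debtor, creditor), amount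
--             else:
--                 key, delta = (creditor, debtor), -amount
--             net_by_pair[key] = net_by_pair.get(key, 0) + delta
--
--     # pass 2: emit each pair's net in its positive direction
--     result: dict[str, dict[str, int]] = defaultdict(lambda: defaultdict(int))
--     for (a, b), net in net_by_pair.items():
--         if net > 0:
--             result[a][b] = net
--         elif net < 0:
--             result[b][a] = -net
--     return result
-- ===== Notes on version B (the rewrite author's own statement) =====
-- stated objective: alternative
-- what changed: Replaces A's seen-set deduplication with a per-edge reverse dict lookup by a single signed per-unordered-pair accumulator (first pass) plus a separate emission pass over the accumulated nets; Pre_ only excludes association lists with duplicate outer or inner keys, which do not encode any Python dict input.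
import Mathlib
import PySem

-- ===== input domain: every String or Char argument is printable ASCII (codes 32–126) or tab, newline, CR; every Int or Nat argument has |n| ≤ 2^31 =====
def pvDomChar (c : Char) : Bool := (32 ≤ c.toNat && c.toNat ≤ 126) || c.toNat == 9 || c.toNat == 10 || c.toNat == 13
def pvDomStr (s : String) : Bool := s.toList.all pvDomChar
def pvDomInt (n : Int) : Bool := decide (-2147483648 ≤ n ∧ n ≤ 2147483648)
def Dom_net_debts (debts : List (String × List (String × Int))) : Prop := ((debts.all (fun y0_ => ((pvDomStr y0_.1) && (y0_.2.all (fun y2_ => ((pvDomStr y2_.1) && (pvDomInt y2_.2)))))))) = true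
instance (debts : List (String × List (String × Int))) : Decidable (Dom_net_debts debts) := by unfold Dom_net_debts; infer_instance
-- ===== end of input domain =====

-- B replaces A's seen-set plus per-edge reverse lookup with a single signed per-pair
-- accumulator and a separate emission pass (objective: alternative decomposition, same cost).

-- ===== PORT A =====
def net_debts (debts : List (String × List (String × Int))) : List (String × List (String × Int)) :=
  let fin :=
    debts.foldl
      (fun (st : PySem.Dict String (PySem.Dict String Int) × PySem.Set (String × String)) p =>
        p.2.foldl
          (fun (st : PySem.Dict String (PySem.Dict String Int) × PySem.Set (String × String)) q =>
            -- debtor = p.1, creditor = q.1, amount = q.2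
            if PySem.Set.contains st.2 (q.1, p.1) then st
            else
              let seen := PySem.Set.add st.2 (p.1, q.1)
              -- reverse = debts.get(creditor, {}).get(debtor, 0)
              let reverse := PySem.Dict.getD (PySem.Dict.mk (PySem.Dict.getD (PySem.Dict.mk debts) q.1 [])) p.1 0
              let net := q.2 - reverse
              if net > 0 then
                (PySem.Dict.insert st.1 p.1 (PySem.Dict.insert (PySem.Dict.getD st.1 p.1 PySem.Dict.empty) q.1 net), seen)
              else if net < 0 then
                (PySem.Dict.insert st.1 q.1 (PySem.Dict.insert (PySem.Dict.getD st.1 q.1 PySem.Dict.empty) p.1 (-net)), seen)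
              else (st.1, seen))
          st)
      (PySem.Dict.empty, PySem.Set.empty)
  fin.1.items.map (fun p => (p.1, p.2.items))

-- ===== PORT B =====
def net_debts_alt (debts : List (String × List (String × Int))) : List (String × List (String × Int)) :=
  -- pass 1: signed per-unordered-pair accumulator, keyed in first-occurrence order
  let pairs : PySem.Dict (String × String) Int :=
    debts.foldl
      (fun (d : PySem.Dict (String × String) Int) p =>
        p.2.foldl
          (fun (d : PySem.Dict (String × String) Int) q =>
            if p.1 = q.1 then d
            else
              let kd := if p.1 < q.1 then ((p.1, q.1), q.2) else ((q.1, p.1), -q.2)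
              PySem.Dict.insert d kd.1 (PySem.Dict.getD d kd.1 0 + kd.2))
          d)
      PySem.Dict.empty
  -- pass 2: emit each pair's net in its positive direction
  let result :=
    pairs.items.foldl
      (fun (r : PySem.Dict String (PySem.Dict String Int)) kv =>
        if kv.2 > 0 then
          PySem.Dict.insert r kv.1.1 (PySem.Dict.insert (PySem.Dict.getD r kv.1.1 PySem.Dict.empty) kv.1.2 kv.2)
        else if kv.2 < 0 then
          PySem.Dict.insert r kv.1.2 (PySem.Dict.insert (PySem.Dict.getD r kv.1.2 PySem.Dict.empty) kv.1.1 (-kv.2))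
        else r)
      PySem.Dict.empty
  result.items.map (fun p => (p.1, p.2.items))

-- ===== PRECONDITION & SPEC =====
-- Pre_ excludes association lists with duplicate outer or inner keys: the Python function
-- receives a dict (of dicts), which cannot carry duplicate keys, so such lists do not
-- encode any input A is ever called on.
def Pre_net_debts (debts : List (String × List (String × Int))) : Prop :=
  (debts.map Prod.fst).Nodup ∧ ∀ p ∈ debts, (p.2.map Prod.fst).Nodup
instance (debts : List (String × List (String × Int))) : Decidable (Pre_net_debts debts) := by
  unfold Pre_net_debts; infer_instance

def pvWitness_net_debts : (List (String × List (String × Int))) :=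
  [("a", [("b", 3), ("a", 1)]), ("b", [("a", 1)])]

def Spec_net_debts (debts : List (String × List (String × Int))) (out : List (String × List (String × Int))) : Prop := out = net_debts_alt debts
instance (debts : List (String × List (String × Int))) (out : List (String × List (String × Int))) : Decidable (Spec_net_debts debts out) := by unfold Spec_net_debts; infer_instance

-- ===== CLAIM (what is proved, stated in full; the proofs are below) =====
def Claim_equal_net_debts : Prop := ∀ (debts : List (String × List (String × Int))), Dom_net_debts debts → Pre_net_debts debts → Spec_net_debts debts (net_debts debts)

-- ===== LEMMAS AND PROOFS =====

-- the flattened edge stream of the nested dict: (debtor, creditor, amount)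
def pvStream (debts : List (String × List (String × Int))) : List (String × String × Int) :=
  debts.flatMap (fun p => p.2.map (fun q => (p.1, q.1, q.2)))

-- global nested lookup  debts.get(x, {}).get(y, 0)
def pvLook (debts : List (String × List (String × Int))) (x y : String) : Int :=
  PySem.Dict.getD (PySem.Dict.mk (PySem.Dict.getD (PySem.Dict.mk debts) x [])) y 0

-- A's inner-loop body as a step function on one edge
def pvStepA (debts : List (String × List (String × Int)))
    (st : PySem.Dict String (PySem.Dict String Int) × PySem.Set (String × String))
    (e : String × String × Int) :
    PySem.Dict String (PySem.Dict String Int) × PySem.Set (String × String) :=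
  if PySem.Set.contains st.2 (e.2.1, e.1) then st
  else if e.2.2 - pvLook debts e.2.1 e.1 > 0 then
    (PySem.Dict.insert st.1 e.1 (PySem.Dict.insert (PySem.Dict.getD st.1 e.1 PySem.Dict.empty) e.2.1 (e.2.2 - pvLook debts e.2.1 e.1)),
      PySem.Set.add st.2 (e.1, e.2.1))
  else if e.2.2 - pvLook debts e.2.1 e.1 < 0 then
    (PySem.Dict.insert st.1 e.2.1 (PySem.Dict.insert (PySem.Dict.getD st.1 e.2.1 PySem.Dict.empty) e.1 (-(e.2.2 - pvLook debts e.2.1 e.1))),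
      PySem.Set.add st.2 (e.1, e.2.1))
  else (st.1, PySem.Set.add st.2 (e.1, e.2.1))

-- signed contribution of one edge to its unordered pair (none = self-loop)
def pvSgn (e : String × String × Int) : Option ((String × String) × Int) :=
  if e.1 = e.2.1 then none
  else if e.1 < e.2.1 then some ((e.1, e.2.1), e.2.2) else some ((e.2.1, e.1), -e.2.2)

-- B's pass-1 body as a step function on one edge
def pvStepB (d : PySem.Dict (String × String) Int) (e : String × String × Int) :
    PySem.Dict (String × String) Int :=
  if e.1 = e.2.1 then d
  else
    PySem.Dict.insert d (if e.1 < e.2.1 then ((e.1, e.2.1), e.2.2) else ((e.2.1, e.1), -e.2.2)).1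
      (PySem.Dict.getD d (if e.1 < e.2.1 then ((e.1, e.2.1), e.2.2) else ((e.2.1, e.1), -e.2.2)).1 0 +
        (if e.1 < e.2.1 then ((e.1, e.2.1), e.2.2) else ((e.2.1, e.1), -e.2.2)).2)

-- B's accumulator step on a signed pair entry
def pvStepP (d : PySem.Dict (String × String) Int) (x : (String × String) × Int) :
    PySem.Dict (String × String) Int :=
  PySem.Dict.insert d x.1 (PySem.Dict.getD d x.1 0 + x.2)

-- B's emission step
def pvEmit (r : PySem.Dict String (PySem.Dict String Int)) (kv : (String × String) × Int) :
    PySem.Dict String (PySem.Dict String Int) :=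
  if kv.2 > 0 then
    PySem.Dict.insert r kv.1.1 (PySem.Dict.insert (PySem.Dict.getD r kv.1.1 PySem.Dict.empty) kv.1.2 kv.2)
  else if kv.2 < 0 then
    PySem.Dict.insert r kv.1.2 (PySem.Dict.insert (PySem.Dict.getD r kv.1.2 PySem.Dict.empty) kv.1.1 (-kv.2))
  else r

def pvW (debts : List (String × List (String × Int))) (k : String × String) : Int :=
  pvLook debts k.1 k.2 - pvLook debts k.2 k.1

def pvEmitAll (debts : List (String × List (String × Int))) (ks : List (String × String)) :
    PySem.Dict String (PySem.Dict String Int) :=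
  (ks.map (fun k => (k, pvW debts k))).foldl pvEmit PySem.Dict.empty

def pvKeys (E : List (String × String × Int)) : List (String × String) :=
  PySem.Set.ofList ((E.filterMap pvSgn).map Prod.fst)

-- total amount of the (x, y) edges in E
def pvAmt (E : List (String × String × Int)) (x y : String) : Int :=
  ((E.filter (fun e => e.1 == x && e.2.1 == y)).map (fun e => e.2.2)).sum

theorem pvBoolExt {a b : Bool} (h : a = true ↔ b = true) : a = b := by
  cases a <;> cases b <;> simp_all

theorem pvNotTrue {b : Bool} (h : ¬ b = true) : b = false := by
  cases b <;> simp_all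

theorem pvFilterPos {α : Type} {p : α → Bool} (a : α) (l : List α) (h : p a = true) :
    (a :: l).filter p = a :: l.filter p := by
  simp [h]

theorem pvFilterNeg {α : Type} {p : α → Bool} (a : α) (l : List α) (h : p a = false) :
    (a :: l).filter p = l.filter p := by
  simp [h]

-- ---- flattening the two ports ----
theorem pvNetA_eq (debts : List (String × List (String × Int))) :
    net_debts debts =
      ((pvStream debts).foldl (pvStepA debts) (PySem.Dict.empty, PySem.Set.empty)).1.items.map
        (fun p => (p.1, p.2.items)) := by
  simp only [net_debts, pvStream, List.foldl_flatMap, List.foldl_map, pvStepA, pvLook]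

theorem pvNetB_eq (debts : List (String × List (String × Int))) :
    net_debts_alt debts =
      (((pvStream debts).foldl pvStepB PySem.Dict.empty).items.foldl pvEmit PySem.Dict.empty).items.map
        (fun p => (p.1, p.2.items)) := by
  simp only [net_debts_alt, pvStream, List.foldl_flatMap, List.foldl_map, pvStepB]
  rfl

-- ---- pvStepA characterizations ----
theorem pvStepA_skip (debts : List (String × List (String × Int))) (st) (e : String × String × Int)
    (h : PySem.Set.contains st.2 (e.2.1, e.1) = true) : pvStepA debts st e = st := by
  unfold pvStepA; rw [if_pos h]

theorem pvStepA_fst (debts : List (String × List (String × Int))) (st) (e : String × String × Int)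
    (h : PySem.Set.contains st.2 (e.2.1, e.1) = false) :
    (pvStepA debts st e).1 =
      (if e.2.2 - pvLook debts e.2.1 e.1 > 0 then
        PySem.Dict.insert st.1 e.1 (PySem.Dict.insert (PySem.Dict.getD st.1 e.1 PySem.Dict.empty) e.2.1 (e.2.2 - pvLook debts e.2.1 e.1))
      else if e.2.2 - pvLook debts e.2.1 e.1 < 0 then
        PySem.Dict.insert st.1 e.2.1 (PySem.Dict.insert (PySem.Dict.getD st.1 e.2.1 PySem.Dict.empty) e.1 (-(e.2.2 - pvLook debts e.2.1 e.1)))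
      else st.1) := by
  unfold pvStepA
  rw [if_neg (by intro hm; rw [hm] at h; exact Bool.noConfusion h)]
  split_ifs <;> rfl

theorem pvStepA_snd (debts : List (String × List (String × Int))) (st) (e : String × String × Int)
    (h : PySem.Set.contains st.2 (e.2.1, e.1) = false) :
    (pvStepA debts st e).2 = PySem.Set.add st.2 (e.1, e.2.1) := by
  unfold pvStepA
  rw [if_neg (by intro hm; rw [hm] at h; exact Bool.noConfusion h)]
  split_ifs <;> rfl

theorem pvStepA_snd_cases (debts : List (String × List (String × Int))) (st)
    (e : String × String × Int) :
    (pvStepA debts st e).2 = st.2 ∨ (pvStepA debts st e).2 = PySem.Set.add st.2 (e.1, e.2.1) := by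
  cases hc : PySem.Set.contains st.2 (e.2.1, e.1)
  · exact Or.inr (pvStepA_snd debts st e hc)
  · exact Or.inl (by rw [pvStepA_skip debts st e hc])

-- ---- facts about A's seen-set ----
theorem pvSeen_mono (debts : List (String × List (String × Int))) :
    ∀ (E : List (String × String × Int))
      (st : PySem.Dict String (PySem.Dict String Int) × PySem.Set (String × String))
      (s : String × String), s ∈ st.2 → s ∈ (E.foldl (pvStepA debts) st).2 := by
  intro E
  induction E with
  | nil => intro st s h; exact h
  | cons e E ih =>
    intro st s h
    refine ih _ s ?_
    rcases pvStepA_snd_cases debts st e with heq | heq <;> rw [heq]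
    · exact h
    · exact (PySem.Set.mem_add _ _ _).mpr (Or.inl h)

theorem pvSeen_src (debts : List (String × List (String × Int))) :
    ∀ (E : List (String × String × Int))
      (st : PySem.Dict String (PySem.Dict String Int) × PySem.Set (String × String))
      (s : String × String),
      s ∈ (E.foldl (pvStepA debts) st).2 → s ∈ st.2 ∨ ∃ a, (s.1, s.2, a) ∈ E := by
  intro E
  induction E with
  | nil => intro st s h; exact Or.inl h
  | cons e E ih =>
    intro st s h
    rcases ih _ s h with h' | ⟨a, ha⟩
    · rcases pvStepA_snd_cases debts st e with heq | heq <;> rw [heq] at h'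
      · exact Or.inl h'
      · rcases (PySem.Set.mem_add _ _ _).mp h' with h'' | h''
        · exact Or.inl h''
        · refine Or.inr ⟨e.2.2, List.mem_cons.mpr (Or.inl ?_)⟩
          rw [h'']
    · exact Or.inr ⟨a, List.mem_cons_of_mem _ ha⟩

theorem pvSeen_cover (debts : List (String × List (String × Int))) :
    ∀ (E : List (String × String × Int))
      (st : PySem.Dict String (PySem.Dict String Int) × PySem.Set (String × String))
      (x y : String) (a : Int), (x, y, a) ∈ E →
      (x, y) ∈ (E.foldl (pvStepA debts) st).2 ∨ (y, x) ∈ (E.foldl (pvStepA debts) st).2 := by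
  intro E
  induction E with
  | nil => intro st x y a h; cases h
  | cons e E ih =>
    intro st x y a h
    rcases List.mem_cons.mp h with h | h
    · have he1 : e.1 = x := by rw [← h]
      have he2 : e.2.1 = y := by rw [← h]
      cases hc : PySem.Set.contains st.2 (e.2.1, e.1)
      · refine Or.inl (pvSeen_mono debts E _ _ ?_)
        rw [pvStepA_snd debts st e hc, he1, he2]
        exact (PySem.Set.mem_add _ _ _).mpr (Or.inr rfl)
      · refine Or.inr (pvSeen_mono debts E _ _ ?_)
        rw [pvStepA_skip debts st e hc]
        have hmem := (PySem.Set.contains_iff _ _).mp hc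
        rwa [he1, he2] at hmem
    · exact ih _ x y a h

-- pvSgn facts
theorem pvSgn_some_lt {e : String × String × Int} {k : String × String} {v : Int}
    (h : pvSgn e = some (k, v)) : k.1 < k.2 := by
  unfold pvSgn at h
  split_ifs at h with h1 h2
  · have hk : (e.1, e.2.1) = k := congrArg Prod.fst (Option.some.inj h)
    rw [← hk]
    exact h2
  · have hk : (e.2.1, e.1) = k := congrArg Prod.fst (Option.some.inj h)
    rw [← hk]
    show e.2.1 < e.1
    rcases lt_trichotomy e.1 e.2.1 with hlt | heq | hgt
    · exact absurd hlt h2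
    · exact absurd heq h1
    · exact hgt

theorem pvSgn_some_ends {e : String × String × Int} {k : String × String} {v : Int}
    (h : pvSgn e = some (k, v)) :
    (e.1 = k.1 ∧ e.2.1 = k.2) ∨ (e.1 = k.2 ∧ e.2.1 = k.1) := by
  unfold pvSgn at h
  split_ifs at h with h1 h2
  · have hk : (e.1, e.2.1) = k := congrArg Prod.fst (Option.some.inj h)
    exact Or.inl ⟨congrArg Prod.fst hk, congrArg Prod.snd hk⟩
  · have hk : (e.2.1, e.1) = k := congrArg Prod.fst (Option.some.inj h)
    exact Or.inr ⟨congrArg Prod.snd hk, congrArg Prod.fst hk⟩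

theorem pvMem_keys {E : List (String × String × Int)} {k : String × String} :
    k ∈ pvKeys E ↔ ∃ e ∈ E, ∃ v, pvSgn e = some (k, v) := by
  unfold pvKeys
  rw [PySem.Set.mem_ofList]
  constructor
  · intro h
    rcases List.mem_map.mp h with ⟨p, hp, hfst⟩
    rcases List.mem_filterMap.mp hp with ⟨e, he, hsgn⟩
    exact ⟨e, he, p.2, by rw [hsgn, ← hfst]⟩
  · rintro ⟨e, he, v, hsgn⟩
    exact List.mem_map.mpr ⟨(k, v), List.mem_filterMap.mpr ⟨e, he, hsgn⟩, rfl⟩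

-- ---- global lookup facts ----
theorem pvMem_stream {debts : List (String × List (String × Int))} {x y : String} {a : Int} :
    (x, y, a) ∈ pvStream debts ↔ ∃ l, (x, l) ∈ debts ∧ (y, a) ∈ l := by
  unfold pvStream
  rw [List.mem_flatMap]
  constructor
  · rintro ⟨p, hp, hm⟩
    rcases List.mem_map.mp hm with ⟨q, hq, heq⟩
    have h1 : p.1 = x := congrArg Prod.fst heq
    have h2 : q.1 = y := congrArg (fun z => z.2.1) heq
    have h3 : q.2 = a := congrArg (fun z => z.2.2) heq
    refine ⟨p.2, ?_, ?_⟩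
    · rw [← h1]; exact hp
    · rw [← h2, ← h3]; exact hq
  · rintro ⟨l, hl, hy⟩
    exact ⟨(x, l), hl, List.mem_map.mpr ⟨(y, a), hy, rfl⟩⟩

theorem pvLook_mem (debts : List (String × List (String × Int))) (hpre : Pre_net_debts debts) :
    ∀ x y a, (x, y, a) ∈ pvStream debts → pvLook debts x y = a := by
  intro x y a hm
  rcases pvMem_stream.mp hm with ⟨l, hl, hy⟩
  have hkeys : (PySem.Dict.mk debts).keys.Nodup := by
    simpa [PySem.Dict.keys] using hpre.1
  have houter : PySem.Dict.getD (PySem.Dict.mk debts) x [] = l :=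
    PySem.Dict.getD_of_mem_items (PySem.Dict.mk debts) hl hkeys []
  have hinner : (PySem.Dict.mk l).keys.Nodup := by
    simpa [PySem.Dict.keys] using hpre.2 (x, l) hl
  unfold pvLook
  rw [houter]
  exact PySem.Dict.getD_of_mem_items (PySem.Dict.mk l) hy hinner 0

theorem pvLook_absent (debts : List (String × List (String × Int))) (x y : String)
    (h : ∀ a, (x, y, a) ∉ pvStream debts) : pvLook debts x y = 0 := by
  unfold pvLook
  cases hget : PySem.Dict.get? (PySem.Dict.mk debts) x with
  | none =>
    rw [show PySem.Dict.getD (PySem.Dict.mk debts) x [] = [] from by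
      rw [PySem.Dict.getD_eq_get?_getD, hget]; rfl]
    rfl
  | some l =>
    have hl : (x, l) ∈ debts := PySem.Dict.mem_items_of_get?_eq_some (PySem.Dict.mk debts) hget
    rw [show PySem.Dict.getD (PySem.Dict.mk debts) x [] = l from by
      rw [PySem.Dict.getD_eq_get?_getD, hget]; rfl]
    cases hin : PySem.Dict.get? (PySem.Dict.mk l) y with
    | none => rw [PySem.Dict.getD_eq_get?_getD, hin]; rfl
    | some a =>
      exfalso
      have hy : (y, a) ∈ l := PySem.Dict.mem_items_of_get?_eq_some (PySem.Dict.mk l) hin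
      exact h a (pvMem_stream.mpr ⟨l, hl, hy⟩)

-- every stream edge's debtor is an outer key
theorem pvStream_fst_mem {debts : List (String × List (String × Int))}
    {e : String × String × Int} (h : e ∈ pvStream debts) : e.1 ∈ debts.map Prod.fst := by
  rcases List.mem_flatMap.mp h with ⟨p, hp, hm⟩
  rcases List.mem_map.mp hm with ⟨q, _, heq⟩
  exact List.mem_map.mpr ⟨p, hp, congrArg Prod.fst heq⟩

-- with unique keys, each ordered pair occurs at most once in the stream
theorem pvNodup_pairs (debts : List (String × List (String × Int))) (hpre : Pre_net_debts debts) :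
    ((pvStream debts).map (fun e => (e.1, e.2.1))).Nodup := by
  induction debts with
  | nil => simp [pvStream]
  | cons p debts ih =>
    have hpre' : Pre_net_debts debts :=
      ⟨(List.nodup_cons.mp hpre.1).2, fun q hq => hpre.2 q (List.mem_cons_of_mem _ hq)⟩
    have hstream : pvStream (p :: debts) =
        p.2.map (fun q => (p.1, q.1, q.2)) ++ pvStream debts := by
      simp [pvStream]
    rw [hstream, List.map_append, List.nodup_append]
    refine ⟨?_, ih hpre', ?_⟩
    · have h1 : (p.2.map (fun q => (p.1, q.1, q.2))).map (fun e => (e.1, e.2.1)) =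
          (p.2.map Prod.fst).map (fun c => (p.1, c)) := by
        simp [List.map_map, Function.comp]
      rw [h1]
      exact (hpre.2 p List.mem_cons_self).map
        (fun a b hab => by simpa using congrArg Prod.snd hab)
    · intro z hz1 w hw2 heq
      rcases List.mem_map.mp hz1 with ⟨e1, he1, hze⟩
      rcases List.mem_map.mp he1 with ⟨q, hq, he1q⟩
      rcases List.mem_map.mp hw2 with ⟨e2, he2, hwe⟩
      have hz1fst : z.1 = p.1 := by rw [← hze, ← he1q]
      have h21 : e2.1 = w.1 := congrArg Prod.fst hwe
      have he2fst : e2.1 = p.1 := by rw [h21, ← heq, hz1fst]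
      exact (List.nodup_cons.mp hpre.1).1 (he2fst ▸ pvStream_fst_mem he2)

-- at most one stream element per ordered pair: its filter bucket is a singleton
theorem pvFilter_single {α β : Type} [BEq β] [LawfulBEq β] (f : α → β) :
    ∀ (l : List α), (l.map f).Nodup → ∀ a ∈ l, ∀ c, f a = c →
      l.filter (fun x => f x == c) = [a] := by
  intro l
  induction l with
  | nil => intro _ a ha; cases ha
  | cons b l ih =>
    intro hnd a ha c hc
    rcases List.mem_cons.mp ha with rfl | ha'
    · rw [pvFilterPos _ _ (by simp [hc])]
      have hnil : l.filter (fun x => f x == c) = [] := by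
        rw [List.filter_eq_nil_iff]
        intro x hx
        simp only [beq_iff_eq]
        intro hxc
        exact (List.nodup_cons.mp hnd).1 (hc ▸ hxc ▸ List.mem_map.mpr ⟨x, hx, rfl⟩)
      rw [hnil]
    · have hfa : f a ∈ l.map f := List.mem_map.mpr ⟨a, ha', rfl⟩
      have hbne : f b ≠ c := fun hbc =>
        (List.nodup_cons.mp hnd).1 (by rw [hbc, ← hc]; exact hfa)
      rw [pvFilterNeg _ _ (pvNotTrue (by simp only [beq_iff_eq]; exact hbne))]
      exact ih (List.nodup_cons.mp hnd).2 a ha' c hc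

theorem pvAmt_eq_look (debts : List (String × List (String × Int))) (hpre : Pre_net_debts debts)
    (x y : String) : pvAmt (pvStream debts) x y = pvLook debts x y := by
  by_cases h : ∃ a, (x, y, a) ∈ pvStream debts
  · rcases h with ⟨a, ha⟩
    have hnd := pvNodup_pairs debts hpre
    have hfil : (pvStream debts).filter (fun e => (e.1, e.2.1) == (x, y)) = [(x, y, a)] :=
      pvFilter_single (fun e => (e.1, e.2.1)) (pvStream debts) hnd (x, y, a) ha (x, y) rfl
    have hfil' : (pvStream debts).filter (fun e => e.1 == x && e.2.1 == y) = [(x, y, a)] := by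
      rw [← hfil]
      refine List.filter_congr ?_
      intro e _
      exact pvBoolExt (by simp [Bool.and_eq_true, beq_iff_eq, Prod.ext_iff])
    unfold pvAmt
    rw [hfil']
    simp [pvLook_mem debts hpre x y a ha]
  · rw [not_exists] at h
    have hfil : (pvStream debts).filter (fun e => e.1 == x && e.2.1 == y) = [] := by
      rw [List.filter_eq_nil_iff]
      intro e he
      simp only [Bool.and_eq_true, beq_iff_eq, not_and]
      intro h1 h2
      refine h e.2.2 ?_
      rw [← h1, ← h2]
      exact he
    unfold pvAmt
    rw [hfil]
    simp [pvLook_absent debts x y h]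

-- ---- the signed bucket sum over the stream ----
theorem pvBucket_sum :
    ∀ (E : List (String × String × Int)) (k : String × String), k.1 < k.2 →
      (((E.filterMap pvSgn).filter (fun p => p.1 == k)).map Prod.snd).sum =
        pvAmt E k.1 k.2 - pvAmt E k.2 k.1 := by
  intro E
  induction E with
  | nil => intro k hk; simp [pvAmt]
  | cons e E ih =>
    intro k hk
    have hkne : k.1 ≠ k.2 := ne_of_lt hk
    rcases e with ⟨x, y, a⟩
    have ihk := ih k hk
    by_cases hxy : x = y
    · have hs : pvSgn (x, y, a) = none := by simp [pvSgn, hxy]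
      have e2 : pvAmt ((x, y, a) :: E) k.1 k.2 = pvAmt E k.1 k.2 := by
        unfold pvAmt
        rw [pvFilterNeg _ _ (pvNotTrue (by
          simp only [Bool.and_eq_true, beq_iff_eq, not_and]
          intro h1 h2
          exact absurd (by rw [← h1, ← h2]; exact hxy) hkne))]
      have e3 : pvAmt ((x, y, a) :: E) k.2 k.1 = pvAmt E k.2 k.1 := by
        unfold pvAmt
        rw [pvFilterNeg _ _ (pvNotTrue (by
          simp only [Bool.and_eq_true, beq_iff_eq, not_and]
          intro h1 h2
          exact absurd (by rw [← h1, ← h2]; exact hxy) (Ne.symm hkne)))]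
      rw [e2, e3]
      simp only [List.filterMap_cons, hs]
      exact ihk
    · by_cases hlt : x < y
      · have hs : pvSgn (x, y, a) = some ((x, y), a) := by simp [pvSgn, hxy, hlt]
        by_cases hek : (x, y) = k
        · have hx : x = k.1 := congrArg Prod.fst hek
          have hy : y = k.2 := congrArg Prod.snd hek
          have e2 : pvAmt ((x, y, a) :: E) k.1 k.2 = a + pvAmt E k.1 k.2 := by
            unfold pvAmt
            rw [pvFilterPos _ _ (by simp [hx, hy])]
            simp
          have e3 : pvAmt ((x, y, a) :: E) k.2 k.1 = pvAmt E k.2 k.1 := by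
            unfold pvAmt
            rw [pvFilterNeg _ _ (pvNotTrue (by
              simp only [Bool.and_eq_true, beq_iff_eq, not_and]
              intro h1 _
              exact absurd (hx ▸ h1) hkne))]
          rw [e2, e3]
          simp only [List.filterMap_cons, hs]
          rw [pvFilterPos _ _ (by simp [hek])]
          simp only [List.map_cons, List.sum_cons]
          omega
        · have e2 : pvAmt ((x, y, a) :: E) k.1 k.2 = pvAmt E k.1 k.2 := by
            unfold pvAmt
            rw [pvFilterNeg _ _ (pvNotTrue (by
              simp only [Bool.and_eq_true, beq_iff_eq, not_and]
              intro h1 h2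
              exact hek (by rw [h1, h2])))]
          have e3 : pvAmt ((x, y, a) :: E) k.2 k.1 = pvAmt E k.2 k.1 := by
            unfold pvAmt
            rw [pvFilterNeg _ _ (pvNotTrue (by
              simp only [Bool.and_eq_true, beq_iff_eq, not_and]
              intro h1 h2
              rw [h1, h2] at hlt
              exact absurd hk (lt_asymm hlt)))]
          rw [e2, e3]
          simp only [List.filterMap_cons, hs]
          rw [pvFilterNeg _ _ (pvNotTrue (by simp only [beq_iff_eq]; exact hek))]
          exact ihk
      · have hyx : y < x := by
          rcases lt_trichotomy x y with h | h | h
          · exact absurd h hlt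
          · exact absurd h hxy
          · exact h
        have hs : pvSgn (x, y, a) = some ((y, x), -a) := by simp [pvSgn, hxy, hlt]
        by_cases hek : (y, x) = k
        · have hy : y = k.1 := congrArg Prod.fst hek
          have hx : x = k.2 := congrArg Prod.snd hek
          have e2 : pvAmt ((x, y, a) :: E) k.1 k.2 = pvAmt E k.1 k.2 := by
            unfold pvAmt
            rw [pvFilterNeg _ _ (pvNotTrue (by
              simp only [Bool.and_eq_true, beq_iff_eq, not_and]
              intro h1 _
              exact absurd (hx ▸ h1 : k.2 = k.1) (Ne.symm hkne)))]
          have e3 : pvAmt ((x, y, a) :: E) k.2 k.1 = a + pvAmt E k.2 k.1 := by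
            unfold pvAmt
            rw [pvFilterPos _ _ (by simp [hx, hy])]
            simp
          rw [e2, e3]
          simp only [List.filterMap_cons, hs]
          rw [pvFilterPos _ _ (by simp [hek])]
          simp only [List.map_cons, List.sum_cons]
          omega
        · have e2 : pvAmt ((x, y, a) :: E) k.1 k.2 = pvAmt E k.1 k.2 := by
            unfold pvAmt
            rw [pvFilterNeg _ _ (pvNotTrue (by
              simp only [Bool.and_eq_true, beq_iff_eq, not_and]
              intro h1 h2
              rw [h1, h2] at hyx
              exact absurd hk (lt_asymm hyx)))]
          have e3 : pvAmt ((x, y, a) :: E) k.2 k.1 = pvAmt E k.2 k.1 := by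
            unfold pvAmt
            rw [pvFilterNeg _ _ (pvNotTrue (by
              simp only [Bool.and_eq_true, beq_iff_eq, not_and]
              intro h1 h2
              exact hek (by rw [h1, h2])))]
          rw [e2, e3]
          simp only [List.filterMap_cons, hs]
          rw [pvFilterNeg _ _ (pvNotTrue (by simp only [beq_iff_eq]; exact hek))]
          exact ihk

-- ---- B's accumulator: fold over the signed stream ----
theorem pvStepB_sgn (d : PySem.Dict (String × String) Int) (e : String × String × Int) :
    pvStepB d e = (match pvSgn e with | some y => pvStepP d y | none => d) := by
  unfold pvStepB pvSgn pvStepP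
  by_cases h1 : e.1 = e.2.1
  · simp [h1]
  · by_cases h2 : e.1 < e.2.1 <;> simp [h1, h2]

theorem pvFoldB :
    ∀ (l : List (String × String × Int)) (d : PySem.Dict (String × String) Int),
      l.foldl pvStepB d = (l.filterMap pvSgn).foldl pvStepP d := by
  intro l
  induction l with
  | nil => intro d; rfl
  | cons e l ih =>
    intro d
    rw [List.foldl_cons, pvStepB_sgn]
    cases h : pvSgn e <;> simp [h, ih]

-- value of B's accumulator at a key
theorem pvGetD_foldl_stepP :
    ∀ (S : List ((String × String) × Int)) (d0 : PySem.Dict (String × String) Int)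
      (k : String × String),
      PySem.Dict.getD (S.foldl pvStepP d0) k 0 =
        PySem.Dict.getD d0 k 0 + ((S.filter (fun p => p.1 == k)).map Prod.snd).sum := by
  intro S
  induction S with
  | nil => intro d0 k; simp
  | cons p S ih =>
    intro d0 k
    rw [List.foldl_cons, ih]
    by_cases h : p.1 = k
    · rw [pvFilterPos _ _ (by simp [h])]
      simp only [List.map_cons, List.sum_cons]
      unfold pvStepP
      rw [PySem.Dict.getD_insert, if_pos h.symm, h]
      ring
    · rw [pvFilterNeg _ _ (pvNotTrue (by simp only [beq_iff_eq]; exact h))]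
      unfold pvStepP
      rw [PySem.Dict.getD_insert, if_neg (fun hc => h hc.symm)]

-- keys of B's accumulator, in first-occurrence order
theorem pvKeys_foldl_stepP_gen :
    ∀ (S : List ((String × String) × Int)) (d : PySem.Dict (String × String) Int),
      (S.foldl pvStepP d).keys = PySem.Set.update d.keys (S.map Prod.fst) := by
  intro S
  induction S with
  | nil => intro d; rfl
  | cons p S ih =>
    intro d
    rw [List.foldl_cons, ih, List.map_cons, PySem.Set.update_cons]
    congr 1
    cases hc : PySem.Dict.contains d p.1
    · rw [show pvStepP d p = PySem.Dict.insert d p.1 (PySem.Dict.getD d p.1 0 + p.2) from rfl,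
        PySem.Dict.keys_insert_of_not_contains _ _ hc, PySem.Set.add_eq_ite,
        if_neg (fun hm => by
          rw [(PySem.Dict.contains_iff_mem_keys _ _).mpr hm] at hc
          exact Bool.noConfusion hc)]
    · rw [show pvStepP d p = PySem.Dict.insert d p.1 (PySem.Dict.getD d p.1 0 + p.2) from rfl,
        PySem.Dict.keys_insert_of_contains _ _ hc, PySem.Set.add_eq_ite,
        if_pos ((PySem.Dict.contains_iff_mem_keys _ _).mp hc)]

theorem pvKeys_foldl_stepP (S : List ((String × String) × Int)) :
    (S.foldl pvStepP PySem.Dict.empty).keys = PySem.Set.ofList (S.map Prod.fst) := by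
  rw [pvKeys_foldl_stepP_gen, PySem.Dict.keys_empty, PySem.Set.update_nil_left]

-- ---- the main A-side run lemma ----
theorem pvA_run (debts : List (String × List (String × Int))) :
    ∀ (E : List (String × String × Int)),
      ((E.map (fun e => (e.1, e.2.1))).Nodup) →
      (∀ x y a, (x, y, a) ∈ E → pvLook debts x y = a) →
      (E.foldl (pvStepA debts) (PySem.Dict.empty, PySem.Set.empty)).1 =
        pvEmitAll debts (pvKeys E) := by
  intro E
  induction E using List.reverseRecOn with
  | nil => intro _ _; rfl
  | append_singleton E e ih =>
    intro hnd hlk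
    have hndE : (E.map (fun e => (e.1, e.2.1))).Nodup := by
      rw [List.map_append] at hnd
      exact (List.nodup_append.mp hnd).1
    have hdisj : (e.1, e.2.1) ∉ E.map (fun e => (e.1, e.2.1)) := by
      rw [List.map_append] at hnd
      intro hc
      exact (List.nodup_append.mp hnd).2.2 _ hc _ (by simp) rfl
    have hlkE : ∀ x y a, (x, y, a) ∈ E → pvLook debts x y = a := fun x y a h =>
      hlk x y a (List.mem_append_left _ h)
    have ihE := ih hndE hlkE
    rw [List.foldl_append]
    rcases e with ⟨d, c, a⟩
    simp only [List.foldl_cons, List.foldl_nil]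
    set st1 := E.foldl (pvStepA debts) (PySem.Dict.empty, PySem.Set.empty) with hst1
    have hnotdc : ∀ b, (d, c, b) ∉ E := by
      intro b hb
      exact hdisj (List.mem_map.mpr ⟨(d, c, b), hb, rfl⟩)
    by_cases hdc : d = c
    · -- self-loop: never skipped (unique pair), net = 0, no key added, nothing emitted
      subst hdc
      have hseen : (d, d) ∉ st1.2 := by
        intro hmem
        rcases pvSeen_src debts E _ _ hmem with h | ⟨b, hb⟩
        · simp [PySem.Set.empty] at h
        · exact hnotdc b hb
      have hcont : PySem.Set.contains st1.2 (d, d) = false := by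
        cases hc : PySem.Set.contains st1.2 (d, d)
        · rfl
        · exact absurd ((PySem.Set.contains_iff _ _).mp hc) hseen
      have hkeys : pvKeys (E ++ [(d, d, a)]) = pvKeys E := by
        unfold pvKeys
        rw [List.filterMap_append, show List.filterMap pvSgn [(d, d, a)] = [] from by
          simp [pvSgn], List.append_nil]
      have hlook : pvLook debts d d = a := hlk d d a (by simp)
      rw [hkeys, pvStepA_fst debts st1 (d, d, a) hcont]
      show (if a - pvLook debts d d > 0 then _ else if a - pvLook debts d d < 0 then _ else st1.1) = _
      rw [hlook, if_neg (by omega), if_neg (by omega)]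
      exact ihE
    · have hk12 : ∃ k : String × String,
          (if d < c then ((d, c) : String × String) else (c, d)) = k := ⟨_, rfl⟩
      rcases hk12 with ⟨k, hkdef⟩
      have hsgnk : ∃ v, pvSgn (d, c, a) = some (k, v) := by
        by_cases h2 : d < c
        · exact ⟨a, by rw [← hkdef]; simp [pvSgn, hdc, h2]⟩
        · exact ⟨-a, by rw [← hkdef]; simp [pvSgn, hdc, h2]⟩
      have hkeysapp : pvKeys (E ++ [(d, c, a)]) = PySem.Set.add (pvKeys E) k := by
        unfold pvKeys
        rcases hsgnk with ⟨v, hv⟩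
        rw [List.filterMap_append, show List.filterMap pvSgn [(d, c, a)] = [(k, v)] from by
          simp [hv], List.map_append,
          show List.map Prod.fst [(k, v)] = [k] from rfl]
        exact PySem.Set.ofList_append_singleton _ _
      by_cases hskip : (c, d) ∈ st1.2
      · -- skipped: the reverse direction was already handled, so the key is already present
        have hcont : PySem.Set.contains st1.2 (c, d) = true :=
          (PySem.Set.contains_iff _ _).mpr hskip
        have hkin : k ∈ pvKeys E := by
          rcases pvSeen_src debts E _ _ hskip with h | ⟨b, hb⟩
          · simp [PySem.Set.empty] at h
          · refine pvMem_keys.mpr ⟨(c, d, b), hb, ?_⟩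
            by_cases h2 : d < c
            · refine ⟨-b, ?_⟩
              have hnc : ¬ c < d := lt_asymm h2
              rw [show k = (d, c) from by rw [← hkdef, if_pos h2]]
              simp [pvSgn, Ne.symm hdc, hnc]
            · have hcd : c < d := by
                rcases lt_trichotomy c d with h | h | h
                · exact h
                · exact absurd h.symm hdc
                · exact absurd h h2
              refine ⟨b, ?_⟩
              rw [show k = (c, d) from by rw [← hkdef, if_neg h2]]
              simp [pvSgn, Ne.symm hdc, hcd]
        rw [hkeysapp, PySem.Set.add_of_mem hkin,
          pvStepA_skip debts st1 (d, c, a) hcont]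
        exact ihE
      · -- not skipped: a fresh pair; A emits exactly B's pair event
        have hcont : PySem.Set.contains st1.2 (c, d) = false := by
          cases hc : PySem.Set.contains st1.2 (c, d)
          · rfl
          · exact absurd ((PySem.Set.contains_iff _ _).mp hc) hskip
        have hknotin : k ∉ pvKeys E := by
          intro hkin
          rcases pvMem_keys.mp hkin with ⟨e', he', v', hv'⟩
          have hk12' : (d = k.1 ∧ c = k.2) ∨ (d = k.2 ∧ c = k.1) := by
            by_cases h2 : d < c
            · rw [show k = (d, c) from by rw [← hkdef, if_pos h2]]
              exact Or.inl ⟨rfl, rfl⟩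
            · rw [show k = (c, d) from by rw [← hkdef, if_neg h2]]
              exact Or.inr ⟨rfl, rfl⟩
          have hcases : (e'.1 = d ∧ e'.2.1 = c) ∨ (e'.1 = c ∧ e'.2.1 = d) := by
            rcases pvSgn_some_ends hv' with ⟨ha1, ha2⟩ | ⟨ha1, ha2⟩ <;>
              rcases hk12' with ⟨hb1, hb2⟩ | ⟨hb1, hb2⟩
            · exact Or.inl ⟨by rw [ha1, ← hb1], by rw [ha2, ← hb2]⟩
            · exact Or.inr ⟨by rw [ha1, ← hb2], by rw [ha2, ← hb1]⟩
            · exact Or.inr ⟨by rw [ha1, ← hb2], by rw [ha2, ← hb1]⟩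
            · exact Or.inl ⟨by rw [ha1, ← hb1], by rw [ha2, ← hb2]⟩
          rcases hcases with ⟨h1, h2⟩ | ⟨h1, h2⟩
          · refine hnotdc e'.2.2 ?_
            rw [show ((d, c, e'.2.2) : String × String × Int) = e' from by
              rw [← h1, ← h2]]
            exact he'
          · have he'' : (c, d, e'.2.2) ∈ E := by
              rw [show ((c, d, e'.2.2) : String × String × Int) = e' from by
                rw [← h1, ← h2]]
              exact he'
            rcases pvSeen_cover debts E (PySem.Dict.empty, PySem.Set.empty) c d e'.2.2 he'' with h | h
            · exact hskip h
            · rcases pvSeen_src debts E _ _ h with h' | ⟨b, hb⟩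
              · simp [PySem.Set.empty] at h'
              · exact hnotdc b hb
        have hemit : pvEmitAll debts (pvKeys E ++ [k]) =
            pvEmit (pvEmitAll debts (pvKeys E)) (k, pvW debts k) := by
          unfold pvEmitAll
          rw [List.map_append, List.foldl_append]
          rfl
        rw [hkeysapp, PySem.Set.add_of_not_mem hknotin, hemit, ← ihE]
        have hlook : pvLook debts d c = a := hlk d c a (by simp)
        rw [pvStepA_fst debts st1 (d, c, a) hcont]
        show (if a - pvLook debts c d > 0 then _ else if a - pvLook debts c d < 0 then _ else st1.1) = _
        by_cases h2 : d < c
        · have hk1 : k = (d, c) := by rw [← hkdef, if_pos h2]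
          have hW : pvW debts (d, c) = a - pvLook debts c d := by
            unfold pvW
            rw [show ((d, c) : String × String).1 = d from rfl,
              show ((d, c) : String × String).2 = c from rfl, hlook]
          rw [hk1]
          unfold pvEmit
          rw [hW]
        · have hk1 : k = (c, d) := by rw [← hkdef, if_neg h2]
          have hW : pvW debts (c, d) = pvLook debts c d - a := by
            unfold pvW
            rw [show ((c, d) : String × String).1 = c from rfl,
              show ((c, d) : String × String).2 = d from rfl, hlook]
          rw [hk1]
          unfold pvEmit
          rw [hW]
          by_cases hpos : a - pvLook debts c d > 0
          · rw [if_pos hpos, if_neg (by omega), if_pos (by omega)]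
            rw [show -(pvLook debts c d - a) = a - pvLook debts c d from by ring]
          · rw [if_neg hpos]
            by_cases hneg : a - pvLook debts c d < 0
            · rw [if_pos hneg, if_pos (by omega)]
              rw [show pvLook debts c d - a = -(a - pvLook debts c d) from by ring]
            · rw [if_neg hneg, if_neg (by omega), if_neg (by omega)]

-- ---- the main B-side items lemma ----
theorem pvB_items (debts : List (String × List (String × Int))) (hpre : Pre_net_debts debts) :
    (((pvStream debts).filterMap pvSgn).foldl pvStepP PySem.Dict.empty).items =
      (pvKeys (pvStream debts)).map (fun k => (k, pvW debts k)) := by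
  have hnd : (((pvStream debts).filterMap pvSgn).foldl pvStepP PySem.Dict.empty).keys.Nodup := by
    rw [pvKeys_foldl_stepP]
    exact PySem.Set.nodup_ofList _
  rw [PySem.Dict.items_eq_map_keys _ hnd 0, pvKeys_foldl_stepP]
  have hkeys : PySem.Set.ofList (((pvStream debts).filterMap pvSgn).map Prod.fst) =
      pvKeys (pvStream debts) := rfl
  rw [hkeys]
  refine List.map_congr_left ?_
  intro k hk
  rcases pvMem_keys.mp hk with ⟨e, he, v, hv⟩
  have hklt : k.1 < k.2 := pvSgn_some_lt hv
  rw [pvGetD_foldl_stepP, PySem.Dict.getD_empty,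
    pvBucket_sum (pvStream debts) k hklt,
    pvAmt_eq_look debts hpre k.1 k.2, pvAmt_eq_look debts hpre k.2 k.1]
  rw [show pvW debts k = pvLook debts k.1 k.2 - pvLook debts k.2 k.1 from rfl]
  ring_nf

-- ===== VERDICT (by name: the statement is the Claim_ definition above) =====
theorem net_debts_spec : Claim_equal_net_debts := by
  intro debts _ hpre
  unfold Spec_net_debts
  rw [pvNetA_eq, pvNetB_eq, pvFoldB,
    pvA_run debts (pvStream debts) (pvNodup_pairs debts hpre) (pvLook_mem debts hpre),
    pvB_items debts hpre]
  rfl
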